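-- pv_equiv track=rewrite | github.com/sasobhabha/Sanskrit-Conjugator | src/rebuild_clean.py | slp1_to_iast
-- ===== SOURCE A (Python) =====
-- SLP1_TO_IAST = {
--     'a':'a','A':'ā','i':'i','I':'ī','u':'u','U':'ū','f':'ṛ','F':'ṝ','x':'ḷ','X':'ḹ',
--     'e':'e','E':'ai','o':'o','O':'au','M':'ṃ','H':'ḥ',
--     'k':'k','K':'kh','g':'g','G':'gh','N':'ṅ','c':'c','C':'ch','j':'j','J':'jh','Y':'ñ',
--     'w':'ṭ','W':'ṭh','q':'ḍ','Q':'ḍh','R':'ṇ','t':'t','T':'th','d':'d','D':'dh','n':'n',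
--     'p':'p','P':'ph','b':'b','B':'bh','m':'m','y':'y','r':'r','l':'l','v':'v',
--     'S':'ś','z':'ṣ','s':'s','h':'h',
-- }
--
-- def slp1_to_iast(text):
--     result = []; i = 0
--     while i < len(text):
--         matched = False
--         for length in [2,1]:
--             if i+length <= len(text):
--                 sub = text[i:i+length]
--                 if sub in SLP1_TO_IAST:
--                     result.append(SLP1_TO_IAST[sub]); i += length; matched = True; break
--         if not matched: result.append(text[i]); i += 1
--     return ''.join(result)
-- ===== SOURCE B (Python) =====
-- def _iast(ch):
--     # direct per-character conditional mapping; no table, no tokenizer state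
--     match ch:
--         case 'a': return 'a'
--         case 'A': return 'ā'
--         case 'i': return 'i'
--         case 'I': return 'ī'
--         case 'u': return 'u'
--         case 'U': return 'ū'
--         case 'f': return 'ṛ'
--         case 'F': return 'ṝ'
--         case 'x': return 'ḷ'
--         case 'X': return 'ḹ'
--         case 'e': return 'e'
--         case 'E': return 'ai'
--         case 'o': return 'o'
--         case 'O': return 'au'
--         case 'M': return 'ṃ'
--         case 'H': return 'ḥ'
--         case 'k': return 'k'
--         case 'K': return 'kh'
--         case 'g': return 'g'
--         case 'G': return 'gh'
--         case 'N': return 'ṅ'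
--         case 'c': return 'c'
--         case 'C': return 'ch'
--         case 'j': return 'j'
--         case 'J': return 'jh'
--         case 'Y': return 'ñ'
--         case 'w': return 'ṭ'
--         case 'W': return 'ṭh'
--         case 'q': return 'ḍ'
--         case 'Q': return 'ḍh'
--         case 'R': return 'ṇ'
--         case 't': return 't'
--         case 'T': return 'th'
--         case 'd': return 'd'
--         case 'D': return 'dh'
--         case 'n': return 'n'
--         case 'p': return 'p'
--         case 'P': return 'ph'
--         case 'b': return 'b'
--         case 'B': return 'bh'
--         case 'm': return 'm'
--         case 'y': return 'y'
--         case 'r': return 'r'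
--         case 'l': return 'l'
--         case 'v': return 'v'
--         case 'S': return 'ś'
--         case 'z': return 'ṣ'
--         case 's': return 's'
--         case 'h': return 'h'
--         case _: return ch
--
-- def slp1_to_iast(text):
--     out = []
--     for ch in text:
--         out.append(_iast(ch))
--     return ''.join(out)
-- ===== Notes on version B (the rewrite author's own statement) =====
-- stated objective: alternative
-- what changed: Replaced the index-driven maximal-munch tokenizer (while loop over i, length list [2,1], slicing, matched flag, dict) with a table-free per-character conditional mapping function applied in one accumulator pass; exact because every dict key is a single character, so A's 2-length branch never matches and unmapped characters fall through identically.
import Mathlib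
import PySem

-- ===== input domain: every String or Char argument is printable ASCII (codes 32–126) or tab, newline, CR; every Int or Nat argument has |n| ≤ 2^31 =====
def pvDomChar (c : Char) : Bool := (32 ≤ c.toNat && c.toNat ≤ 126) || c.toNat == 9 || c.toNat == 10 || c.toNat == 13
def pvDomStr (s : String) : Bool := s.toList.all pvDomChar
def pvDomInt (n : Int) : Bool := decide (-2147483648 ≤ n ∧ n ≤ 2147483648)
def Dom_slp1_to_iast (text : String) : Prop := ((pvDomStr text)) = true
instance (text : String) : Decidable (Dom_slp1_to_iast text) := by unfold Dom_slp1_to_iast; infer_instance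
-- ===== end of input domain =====

-- B replaces A's maximal-munch while/for-length tokenizer (index, length list, slicing,
-- matched flag, dict) by a table-free per-character conditional mapping applied in one
-- accumulator pass; exact because every table key is a single character.


-- ===== PORT A =====
-- the module constant SLP1_TO_IAST (string keys ported as List Char per the Chars convention)
def SLP1_TO_IAST : PySem.Dict (List Char) String := PySem.Dict.mk
  [(['a'],"a"),(['A'],"ā"),(['i'],"i"),(['I'],"ī"),(['u'],"u"),(['U'],"ū"),
   (['f'],"ṛ"),(['F'],"ṝ"),(['x'],"ḷ"),(['X'],"ḹ"),(['e'],"e"),(['E'],"ai"),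
   (['o'],"o"),(['O'],"au"),(['M'],"ṃ"),(['H'],"ḥ"),(['k'],"k"),(['K'],"kh"),
   (['g'],"g"),(['G'],"gh"),(['N'],"ṅ"),(['c'],"c"),(['C'],"ch"),(['j'],"j"),
   (['J'],"jh"),(['Y'],"ñ"),(['w'],"ṭ"),(['W'],"ṭh"),(['q'],"ḍ"),(['Q'],"ḍh"),
   (['R'],"ṇ"),(['t'],"t"),(['T'],"th"),(['d'],"d"),(['D'],"dh"),(['n'],"n"),
   (['p'],"p"),(['P'],"ph"),(['b'],"b"),(['B'],"bh"),(['m'],"m"),(['y'],"y"),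
   (['r'],"r"),(['l'],"l"),(['v'],"v"),(['S'],"ś"),(['z'],"ṣ"),(['s'],"s"),
   (['h'],"h")]

-- A's while loop over index i, trying sub = text[i:i+2] then text[i:i+1], advancing by the
-- matched length (else appending text[i] and advancing 1), as structural recursion on the
-- remaining characters; branches in A's order (length 2 first, then 1, then unmatched)
def slp1Loop : List Char → List String
  | [] => []
  | c :: [] =>
    match SLP1_TO_IAST.get? [c] with
    | some v => [v]
    | none => [String.ofList [c]]
  | c :: c2 :: rest =>
    match SLP1_TO_IAST.get? [c, c2] with
    | some v => v :: slp1Loop rest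
    | none =>
      match SLP1_TO_IAST.get? [c] with
      | some v => v :: slp1Loop (c2 :: rest)
      | none => String.ofList [c] :: slp1Loop (c2 :: rest)

def slp1_to_iast (text : String) : String := PySem.Str.join "" (slp1Loop text.toList)

-- ===== PORT B =====
-- Source B's _iast: a direct per-character match (Python's match/case), pass-through default
def iastChar (c : Char) : String :=
  match c with
  | 'a' => "a"
  | 'A' => "ā"
  | 'i' => "i"
  | 'I' => "ī"
  | 'u' => "u"
  | 'U' => "ū"
  | 'f' => "ṛ"
  | 'F' => "ṝ"
  | 'x' => "ḷ"
  | 'X' => "ḹ"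
  | 'e' => "e"
  | 'E' => "ai"
  | 'o' => "o"
  | 'O' => "au"
  | 'M' => "ṃ"
  | 'H' => "ḥ"
  | 'k' => "k"
  | 'K' => "kh"
  | 'g' => "g"
  | 'G' => "gh"
  | 'N' => "ṅ"
  | 'c' => "c"
  | 'C' => "ch"
  | 'j' => "j"
  | 'J' => "jh"
  | 'Y' => "ñ"
  | 'w' => "ṭ"
  | 'W' => "ṭh"
  | 'q' => "ḍ"
  | 'Q' => "ḍh"
  | 'R' => "ṇ"
  | 't' => "t"
  | 'T' => "th"
  | 'd' => "d"
  | 'D' => "dh"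
  | 'n' => "n"
  | 'p' => "p"
  | 'P' => "ph"
  | 'b' => "b"
  | 'B' => "bh"
  | 'm' => "m"
  | 'y' => "y"
  | 'r' => "r"
  | 'l' => "l"
  | 'v' => "v"
  | 'S' => "ś"
  | 'z' => "ṣ"
  | 's' => "s"
  | 'h' => "h"
  | _ => String.ofList [c]

-- Source B's loop: out = []; for ch in text: out.append(_iast(ch)); return ''.join(out)
def slp1_to_iast_alt (text : String) : String :=
  PySem.Str.join "" (text.toList.foldl (fun out c => out ++ [iastChar c]) [])

-- ===== PRECONDITION & SPEC =====
def Spec_slp1_to_iast (text : String) (out : String) : Prop := out = slp1_to_iast_alt text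
instance (text : String) (out : String) : Decidable (Spec_slp1_to_iast text out) := by unfold Spec_slp1_to_iast; infer_instance

-- ===== CLAIM (what is proved, stated in full; the proofs are below) =====
def Claim_equal_slp1_to_iast : Prop := ∀ (text : String), Dom_slp1_to_iast text → Spec_slp1_to_iast text (slp1_to_iast text)

-- ===== LEMMAS AND PROOFS =====

-- every key of the table is a single character, so a two-character lookup misses
theorem slp1_get2_none (c1 c2 : Char) : SLP1_TO_IAST.get? [c1, c2] = none := by
  simp [SLP1_TO_IAST, PySem.Dict.get?]

-- decidable per-character check: B's match function agrees with the single-character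
-- dict lookup (with pass-through default) at code point n
def charOK (n : Nat) : Bool :=
  iastChar (Char.ofNat n) == (match SLP1_TO_IAST.get? [Char.ofNat n] with
    | some v => v
    | none => String.ofList [Char.ofNat n])

theorem charOK_all : ((List.range 128).all fun n => charOK n) = true := by decide

theorem slp1_get1_eq (c : Char) (h : pvDomChar c = true) :
    iastChar c = (match SLP1_TO_IAST.get? [c] with
                  | some v => v
                  | none => String.ofList [c]) := by
  have hlt : c.toNat < 128 := by
    simp only [pvDomChar, Bool.or_eq_true, Bool.and_eq_true, decide_eq_true_eq,
               beq_iff_eq] at h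
    omega
  have hok : charOK c.toNat = true :=
    List.all_eq_true.mp charOK_all c.toNat (List.mem_range.mpr hlt)
  unfold charOK at hok
  rw [Char.ofNat_toNat c] at hok
  exact eq_of_beq hok

theorem slp1Loop_cons (c : Char) (rest : List Char) (h : pvDomChar c = true) :
    slp1Loop (c :: rest) = iastChar c :: slp1Loop rest := by
  have heq := slp1_get1_eq c h
  cases hg : SLP1_TO_IAST.get? [c] <;> rw [hg] at heq <;>
    cases rest <;> simp [slp1Loop, hg, slp1_get2_none, heq]

theorem slp1Loop_eq_map (cs : List Char) (h : ∀ c ∈ cs, pvDomChar c = true) :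
    slp1Loop cs = cs.map iastChar := by
  induction cs with
  | nil => rfl
  | cons c rest ih =>
    rw [slp1Loop_cons c rest (h c List.mem_cons_self), ih (fun x hx => h x (List.mem_cons_of_mem c hx)),
        List.map_cons]

-- ===== VERDICT (by name: the statement is the Claim_ definition above) =====
theorem slp1_to_iast_spec : Claim_equal_slp1_to_iast := by
  intro text hdom
  unfold Spec_slp1_to_iast slp1_to_iast slp1_to_iast_alt
  rw [slp1Loop_eq_map text.toList (List.all_eq_true.mp hdom),
      PySem.List.foldl_append_singleton_eq_map, List.nil_append]
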